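-- pv_equiv track=rewrite | github.com/HateBin/SoftwareQualityRating | test3_V2.1.py | calculation_plot_y_max_height
-- ===== SOURCE A (Python) =====
-- import math
--
-- def calculation_plot_y_max_height(max_number: int):
--     """
--     根据提供的最大数字计算图表的Y轴最大高度和Y轴间隔。
--
--     该函数的目的是为了合理设置图表的Y轴刻度间隔和最大高度，使得图表既不过于拥挤也不过于稀疏。
--     参数:
--     - max_number (int): 图表中最大的数字。
--
--     返回:
--     - range_max (float): 计算出的Y轴最大高度。
--     - y_interval (int): 计算出的Y轴刻度间隔。
--     """
--     # 处理max_number为None或0的情况，设置默认值和初始Y轴间隔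
--     if not max_number:
--         max_number = 1
--         y_interval = 1
--     # 根据max_number的值选择合适的Y轴间隔
--     elif max_number < 5:
--         y_interval = 1
--     elif max_number < 9:
--         y_interval = 2
--     elif max_number < 15:
--         y_interval = 3
--     else:
--         y_interval = 5
--
--     # 循环计算合适的Y轴最大高度和间隔
--     while True:
--         # 计算初步的Y轴最大高度
--         range_max = math.ceil(max_number / y_interval) * y_interval
--         # 如果初步计算的高度等于max_number，增加一个间隔以避免最大值重合
--         if range_max == max_number:
--             range_max += y_interval
--         # 检查Y轴刻度数是否超过7，如果超过则加大间隔
--         if range_max // y_interval > 7: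
--             y_interval *= 2
--         else:
--             break
--     # 返回计算出的Y轴最大高度和间隔
--     return range_max, y_interval
-- ===== SOURCE B (Python) =====
-- def calculation_plot_y_max_height(max_number):
--     # Pick the base interval with the same cascade.
--     if not max_number:
--         max_number = 1
--         base = 1
--     elif max_number < 5:
--         base = 1
--     elif max_number < 9:
--         base = 2
--     elif max_number < 15:
--         base = 3
--     else:
--         base = 5
--     # The doubling loop of A stops at the first interval i = base*2^k with
--     # max_number // i <= 6, i.e. max_number < 7*i; compute that k directly.
--     if max_number < 7 * base:
--         y_interval = base
--     else:
--         y_interval = base << (max_number // (7 * base)).bit_length()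
--     # One ceiling division, bumped once if it lands exactly on max_number.
--     range_max = -(-max_number // y_interval) * y_interval
--     if range_max == max_number:
--         range_max += y_interval
--     return range_max, y_interval
-- ===== Notes on version B (the rewrite author's own statement) =====
-- stated objective: simpler
-- what changed: A's doubling while-loop (recompute ceil, bump, test tick count, double interval) is replaced by a closed-form computation: the final interval is base << (max_number // (7*base)).bit_length(), followed by a single integer ceiling division and one bump check.
import Mathlib
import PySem

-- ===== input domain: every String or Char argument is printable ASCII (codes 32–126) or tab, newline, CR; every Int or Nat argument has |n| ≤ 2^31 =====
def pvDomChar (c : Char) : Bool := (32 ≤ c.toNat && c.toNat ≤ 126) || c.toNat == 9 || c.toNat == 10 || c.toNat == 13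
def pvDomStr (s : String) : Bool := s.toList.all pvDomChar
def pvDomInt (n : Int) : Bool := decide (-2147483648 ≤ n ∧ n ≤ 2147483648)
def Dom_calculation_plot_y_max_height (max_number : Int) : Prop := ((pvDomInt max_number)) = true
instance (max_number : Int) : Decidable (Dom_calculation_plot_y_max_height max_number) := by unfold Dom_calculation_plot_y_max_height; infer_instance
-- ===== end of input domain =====

-- B replaces A's doubling while-loop by a closed-form bit_length computation of the
-- final interval and one ceiling division (objective: simpler; no speed claim).

-- ===== PORT A =====
-- math.ceil(max_number / y_interval) ported as exact integer ceiling division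
-- -((-a) // b); exact on the stated domain (|int| ≤ 2^31), where the float
-- quotient never rounds across an integer.
def pvCeilA (a b : Int) : Int := -(PySem.Int.floordiv (-a) b)

-- the 'while True' loop; fuel only makes it total (the Python loop terminates
-- because the interval doubles; on the stated domain 64 steps are never reached).
def pvLoopA (fuel : Nat) (max_number y_interval : Int) : Int × Int :=
  let r0 := pvCeilA max_number y_interval * y_interval
  let range_max := if r0 = max_number then r0 + y_interval else r0
  match fuel with
  | 0 => (range_max, y_interval)
  | f+1 =>
    if PySem.Int.floordiv range_max y_interval > 7 then
      pvLoopA f max_number (y_interval * 2)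
    else (range_max, y_interval)

def calculation_plot_y_max_height (max_number : Int) : Int × Int :=
  if max_number = 0 then pvLoopA 64 1 1
  else if max_number < 5 then pvLoopA 64 max_number 1
  else if max_number < 9 then pvLoopA 64 max_number 2
  else if max_number < 15 then pvLoopA 64 max_number 3
  else pvLoopA 64 max_number 5

-- ===== PORT B =====
def calculation_plot_y_max_height_alt (max_number : Int) : Int × Int :=
  let p : Int × Int :=
    if max_number = 0 then (1, 1)
    else if max_number < 5 then (max_number, 1)
    else if max_number < 9 then (max_number, 2)
    else if max_number < 15 then (max_number, 3)
    else (max_number, 5)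
  let m := p.1
  let base := p.2
  -- base << q.bit_length()  (q = m // (7*base))
  let y : Int :=
    if m < 7 * base then base
    else base * 2 ^ PySem.Int.bitLength (PySem.Int.floordiv m (7 * base))
  let r0 := -(PySem.Int.floordiv (-m) y) * y
  ((if r0 = m then r0 + y else r0), y)

-- ===== PRECONDITION & SPEC =====
def Spec_calculation_plot_y_max_height (max_number : Int) (out : Int × Int) : Prop := out = calculation_plot_y_max_height_alt max_number
instance (max_number : Int) (out : Int × Int) : Decidable (Spec_calculation_plot_y_max_height max_number out) := by unfold Spec_calculation_plot_y_max_height; infer_instance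

-- ===== CLAIM (what is proved, stated in full; the proofs are below) =====
def Claim_equal_calculation_plot_y_max_height : Prop := ∀ (max_number : Int), Dom_calculation_plot_y_max_height max_number → Spec_calculation_plot_y_max_height max_number (calculation_plot_y_max_height max_number)

-- ===== LEMMAS AND PROOFS =====

lemma range_max_eq (m i : Int) (hi : 0 < i) :
    (if pvCeilA m i * i = m then pvCeilA m i * i + i else pvCeilA m i * i)
      = (PySem.Int.floordiv m i + 1) * i := by
  have hq := (PySem.Int.floordiv_eq_iff_of_pos (a := m) hi).mp rfl
  have hc := (PySem.Int.neg_floordiv_neg_eq_iff_of_pos (a := m) hi).mp rfl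
  set q := PySem.Int.floordiv m i with hqdef
  set c := -PySem.Int.floordiv (-m) i with hcdef
  have hce : pvCeilA m i = c := rfl
  rw [hce]
  split_ifs with h
  · have : q = c := by nlinarith [hq.1, hq.2, hc.1, hc.2]
    rw [← this] at h ⊢; linarith [h]  -- goal q*i + i = (q+1)*i
  · have hlt : m < c * i := lt_of_le_of_ne hc.2 (fun he => h he.symm)
    have : c = q + 1 := by nlinarith [hq.1, hq.2, hc.1]
    rw [this]
lemma break_test (m i : Int) (hi : 0 < i) :
    (PySem.Int.floordiv ((PySem.Int.floordiv m i + 1) * i) i > 7) ↔ 7 * i ≤ m := by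
  have : PySem.Int.floordiv ((PySem.Int.floordiv m i + 1) * i) i = PySem.Int.floordiv m i + 1 := by
    rw [PySem.Int.floordiv_eq_iff_of_pos hi]
    constructor
    · exact le_refl _
    · nlinarith
  rw [this]
  constructor
  · intro h
    have h7 : (7:Int) ≤ PySem.Int.floordiv m i := by omega
    have := (PySem.Int.le_floordiv_iff_mul_le (a := m) (q := 7) hi).mp h7
    linarith
  · intro h
    have := (PySem.Int.le_floordiv_iff_mul_le (a := m) (q := 7) hi).mpr (by linarith)
    omega

lemma loop_run (m : Int) : ∀ (k f : Nat) (i : Int), k ≤ f → 0 < i →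
    (∀ j < k, 7 * (i * 2 ^ j) ≤ m) → m < 7 * (i * 2 ^ k) →
    pvLoopA f m i = pvLoopA 0 m (i * 2 ^ k) := by
  intro k
  induction k with
  | zero =>
    intro f i _ hi _ hlt
    rw [pow_zero, mul_one] at hlt ⊢
    cases f with
    | zero => rfl
    | succ f =>
      show (if PySem.Int.floordiv (if pvCeilA m i * i = m then pvCeilA m i * i + i else pvCeilA m i * i) i > 7
            then pvLoopA f m (i * 2)
            else ((if pvCeilA m i * i = m then pvCeilA m i * i + i else pvCeilA m i * i), i))
           = pvLoopA 0 m i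
      rw [range_max_eq m i hi, if_neg (by rw [break_test m i hi]; omega)]
      show _ = (if pvCeilA m i * i = m then pvCeilA m i * i + i else pvCeilA m i * i, i)
      rw [range_max_eq m i hi]
  | succ k ih =>
    intro f i hkf hi hall hlt
    cases f with
    | zero => omega
    | succ f =>
      have h0 : 7 * i ≤ m := by simpa using hall 0 (by omega)
      show (if PySem.Int.floordiv (if pvCeilA m i * i = m then pvCeilA m i * i + i else pvCeilA m i * i) i > 7
            then pvLoopA f m (i * 2)
            else ((if pvCeilA m i * i = m then pvCeilA m i * i + i else pvCeilA m i * i), i))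
           = pvLoopA 0 m (i * 2 ^ (k+1))
      rw [range_max_eq m i hi, if_pos (by rw [break_test m i hi]; exact h0)]
      have := ih f (i * 2) (by omega) (by omega)
        (fun j hj => by have := hall (j+1) (by omega); calc 7 * (i * 2 * 2 ^ j) = 7 * (i * 2 ^ (j+1)) := by ring
                        _ ≤ m := this)
        (by calc m < 7 * (i * 2 ^ (k+1)) := hlt
                 _ = 7 * (i * 2 * 2 ^ k) := by ring)
      rw [this]
      have harg : i * 2 * 2 ^ k = i * 2 ^ (k+1) := by ring
      rw [harg]

lemma branch_eq (m b : Int) (hb : 0 < b) (hm : m ≤ 2 ^ 31) :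
    pvLoopA 64 m b =
      (let y : Int := if m < 7 * b then b
                      else b * 2 ^ PySem.Int.bitLength (PySem.Int.floordiv m (7 * b));
       ((if -(PySem.Int.floordiv (-m) y) * y = m then -(PySem.Int.floordiv (-m) y) * y + y
         else -(PySem.Int.floordiv (-m) y) * y), y)) := by
  by_cases h : m < 7 * b
  · rw [loop_run m 0 64 b (by omega) hb (by omega) (by simpa using h)]
    simp only [if_pos h]
    simp only [pvLoopA, pvCeilA, pow_zero, mul_one]
  · rw [not_lt] at h
    have h7b : (0:Int) < 7 * b := by linarith
    set q := PySem.Int.floordiv m (7 * b) with hqdef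
    set K := PySem.Int.bitLength q with hKdef
    have hq1 : 1 ≤ q := (PySem.Int.le_floordiv_iff_mul_le h7b).mpr (by linarith)
    have hnat : (q.natAbs : Int) = q := Int.natAbs_of_nonneg (by omega)
    have h1 : q < (2:Int) ^ K := by
      have := PySem.Int.lt_two_pow_bitLength q
      have : (q.natAbs : Int) < ((2 ^ K : Nat) : Int) := by exact_mod_cast this
      rw [hnat] at this; push_cast at this; exact this
    have hKlt : m < 7 * (b * 2 ^ K) := by
      have := (PySem.Int.floordiv_lt_iff_lt_mul (a := m) (q := (2:Int)^K) h7b).mp (by rw [← hqdef]; exact h1)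
      linarith [this]
    have h2 : (2:Int) ^ (K - 1) ≤ q := by
      have := PySem.Int.two_pow_bitLength_le q (by omega)
      have : ((2 ^ (K-1) : Nat) : Int) ≤ (q.natAbs : Int) := by exact_mod_cast this
      rw [hnat] at this; push_cast at this; exact this
    have hqm : q * (7 * b) ≤ m := (PySem.Int.le_floordiv_iff_mul_le h7b).mp le_rfl
    have hall : ∀ j < K, 7 * (b * 2 ^ j) ≤ m := by
      intro j hj
      have hje : (2:Int) ^ j ≤ 2 ^ (K - 1) := pow_le_pow_right₀ (by norm_num) (by omega)
      have : (2:Int) ^ j * (7 * b) ≤ q * (7 * b) :=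
        mul_le_mul_of_nonneg_right (le_trans hje h2) (by linarith)
      calc 7 * (b * 2 ^ j) = 2 ^ j * (7 * b) := by ring
        _ ≤ q * (7 * b) := this
        _ ≤ m := hqm
    have hK64 : K ≤ 64 := by
      have hq31 : q.natAbs ≤ 2 ^ 31 := by
        have : q ≤ q * (7 * b) := by nlinarith
        omega
      have := PySem.Int.two_pow_bitLength_le q (by omega)
      have hpow : (2:Nat) ^ (K - 1) ≤ 2 ^ 31 := le_trans this hq31
      have := (Nat.pow_le_pow_iff_right (by norm_num : 1 < 2)).mp hpow
      omega
    rw [loop_run m K 64 b hK64 hb hall hKlt]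
    simp only [if_neg (not_lt.mpr h)]
    simp only [pvLoopA, pvCeilA]

-- ===== VERDICT (by name: the statement is the Claim_ definition above) =====
theorem calculation_plot_y_max_height_spec : Claim_equal_calculation_plot_y_max_height := by
  intro m hdom
  have hm : m ≤ 2 ^ 31 := by
    unfold Dom_calculation_plot_y_max_height pvDomInt at hdom
    simp only [decide_eq_true_eq] at hdom
    omega
  unfold Spec_calculation_plot_y_max_height calculation_plot_y_max_height calculation_plot_y_max_height_alt
  by_cases h0 : m = 0
  · subst h0; decide
  · by_cases h5 : m < 5
    · simp only [if_neg h0, if_pos h5]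
      simpa using branch_eq m 1 one_pos hm
    · by_cases h9 : m < 9
      · simp only [if_neg h0, if_neg h5, if_pos h9]
        simpa using branch_eq m 2 two_pos hm
      · by_cases h15 : m < 15
        · simp only [if_neg h0, if_neg h5, if_neg h9, if_pos h15]
          simpa using branch_eq m 3 three_pos hm
        · simp only [if_neg h0, if_neg h5, if_neg h9, if_neg h15]
          simpa using branch_eq m 5 (by norm_num) hm
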